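-- pv_equiv track=rewrite | github.com/davidmgmeyer/eval-dashboard | utils/taxonomy.py | get_child_column
-- ===== SOURCE A (Python) =====
-- from typing import Optional
--
-- TAXONOMY_LEVELS = {
--     'Risk': ['Risk L1', 'Risk L2', 'Risk L3'],
--     'Attack': ['Attack L1', 'Attack L2', 'Attack L3'],
-- }
--
-- def get_child_column(column: str) -> Optional[str]:
--     """Get the child column for a given taxonomy column.
--
--     Args:
--         column: Current column name (e.g., 'Risk L1')
--
--     Returns:
--         Child column name or None if at bottom level
--     """
--     for taxonomy_type, levels in TAXONOMY_LEVELS.items():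
--         if column in levels:
--             idx = levels.index(column)
--             if idx < len(levels) - 1:
--                 return levels[idx + 1]
--             return None
--     return None
-- ===== SOURCE B (Python) =====
-- from typing import Optional
--
-- # Child map precomputed once: each column maps directly to its child; bottom levels absent.
-- CHILD_COLUMN = {
--     'Risk L1': 'Risk L2',
--     'Risk L2': 'Risk L3',
--     'Attack L1': 'Attack L2',
--     'Attack L2': 'Attack L3',
-- }
--
-- def get_child_column(column: str) -> Optional[str]:
--     return CHILD_COLUMN.get(column)
-- ===== Notes on version B (the rewrite author's own statement) =====
-- stated objective: idiomatic
-- what changed: Replaced the per-call scan over TAXONOMY_LEVELS (membership test + .index + bounds branch) by a module-level constant child map; the function body is a single dict .get lookup.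
import Mathlib
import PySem

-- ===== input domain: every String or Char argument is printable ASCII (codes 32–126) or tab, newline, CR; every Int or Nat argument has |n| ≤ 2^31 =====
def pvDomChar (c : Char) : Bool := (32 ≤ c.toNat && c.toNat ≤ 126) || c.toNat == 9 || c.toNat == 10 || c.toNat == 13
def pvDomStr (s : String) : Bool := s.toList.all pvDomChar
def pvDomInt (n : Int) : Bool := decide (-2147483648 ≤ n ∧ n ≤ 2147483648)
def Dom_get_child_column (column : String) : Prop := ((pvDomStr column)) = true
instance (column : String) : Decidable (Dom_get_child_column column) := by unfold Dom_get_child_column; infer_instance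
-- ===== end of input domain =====

-- B replaces A's per-call scan of TAXONOMY_LEVELS (membership + .index + bounds branch)
-- by a precomputed constant child map and a single dict lookup (idiomatic; same cost class).

-- ===== PORT A =====
def pvTaxonomyLevels : List (String × List String) :=
  [("Risk", ["Risk L1", "Risk L2", "Risk L3"]),
   ("Attack", ["Attack L1", "Attack L2", "Attack L3"])]

-- for-loop over the dict items: first levels list containing the column decides the result
def pvLoopA (column : String) : List (String × List String) → Option String
  | [] => none
  | (_, levels) :: rest =>
    if column ∈ levels then
      match PySem.List.index? levels column with
      | some idx =>
        if idx < levels.length - 1 then PySem.List.pyGet? levels ((idx : Int) + 1) else none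
      | none => none
    else pvLoopA column rest

def get_child_column (column : String) : Option String := pvLoopA column pvTaxonomyLevels

-- ===== PORT B =====
def pvChildColumn : PySem.Dict String String :=
  PySem.Dict.ofList
    [("Risk L1", "Risk L2"), ("Risk L2", "Risk L3"),
     ("Attack L1", "Attack L2"), ("Attack L2", "Attack L3")]

def get_child_column_alt (column : String) : Option String :=
  PySem.Dict.get? pvChildColumn column

-- ===== PRECONDITION & SPEC =====
def Spec_get_child_column (column : String) (out : Option String) : Prop := out = get_child_column_alt column
instance (column : String) (out : Option String) : Decidable (Spec_get_child_column column out) := by unfold Spec_get_child_column; infer_instance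

-- ===== CLAIM (what is proved, stated in full; the proofs are below) =====
def Claim_equal_get_child_column : Prop := ∀ (column : String), Dom_get_child_column column → Spec_get_child_column column (get_child_column column)

-- ===== LEMMAS AND PROOFS =====

-- ===== VERDICT (by name: the statement is the Claim_ definition above) =====
theorem get_child_column_spec : Claim_equal_get_child_column := by
  intro column _
  unfold Spec_get_child_column
  by_cases h1 : column = "Risk L1"
  · subst h1; decide
  by_cases h2 : column = "Risk L2"
  · subst h2; decide
  by_cases h3 : column = "Risk L3"
  · subst h3; decide
  by_cases h4 : column = "Attack L1"
  · subst h4; decide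
  by_cases h5 : column = "Attack L2"
  · subst h5; decide
  by_cases h6 : column = "Attack L3"
  · subst h6; decide
  simp [get_child_column, get_child_column_alt, pvLoopA, pvTaxonomyLevels, pvChildColumn,
    PySem.Dict.ofList, PySem.Dict.update, PySem.Dict.get?_insert, PySem.Dict.get?_empty, h1, h2, h3, h4, h5, h6]
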